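-- pv_equiv track=rewrite | github.com/PomboLutador/utahchess | src/utahchess/tile_movement_utils.py | apply_movement_vector_n_times
-- ===== SOURCE A (Python) =====
-- def apply_movement_vector_n_times(
--     position: tuple[int, int],
--     movement_vector: tuple[int, int],
--     n: int,
-- ) -> tuple[int, int]:
--     """Get a tile with a movement vector applied n times.
--
--     Does not check whether the resulting tile is out of bounds or not.
--     """
--     position_to_return = position
--     while n > 0:
--         position_to_return = (
--             position_to_return[0] + movement_vector[0],
--             position_to_return[1] + movement_vector[1],
--         )
--         n -= 1
--     return position_to_return
-- ===== SOURCE B (Python) =====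
-- def apply_movement_vector_n_times(
--     position: tuple[int, int],
--     movement_vector: tuple[int, int],
--     n: int,
-- ) -> tuple[int, int]:
--     """Get a tile with a movement vector applied n times (binary doubling)."""
--     k = n if n > 0 else 0
--     x, y = position
--     dx, dy = movement_vector
--     while k:
--         if k & 1:
--             x += dx
--             y += dy
--         dx += dx
--         dy += dy
--         k >>= 1
--     return (x, y)
-- ===== Notes on version B (the rewrite author's own statement) =====
-- stated objective: faster
-- what changed: Replaces the n-step while loop (one vector addition per step) with binary doubling over the bits of n: the vector is doubled each round and added only when the current bit is set, so O(log n) additions instead of O(n).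
import Mathlib
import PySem

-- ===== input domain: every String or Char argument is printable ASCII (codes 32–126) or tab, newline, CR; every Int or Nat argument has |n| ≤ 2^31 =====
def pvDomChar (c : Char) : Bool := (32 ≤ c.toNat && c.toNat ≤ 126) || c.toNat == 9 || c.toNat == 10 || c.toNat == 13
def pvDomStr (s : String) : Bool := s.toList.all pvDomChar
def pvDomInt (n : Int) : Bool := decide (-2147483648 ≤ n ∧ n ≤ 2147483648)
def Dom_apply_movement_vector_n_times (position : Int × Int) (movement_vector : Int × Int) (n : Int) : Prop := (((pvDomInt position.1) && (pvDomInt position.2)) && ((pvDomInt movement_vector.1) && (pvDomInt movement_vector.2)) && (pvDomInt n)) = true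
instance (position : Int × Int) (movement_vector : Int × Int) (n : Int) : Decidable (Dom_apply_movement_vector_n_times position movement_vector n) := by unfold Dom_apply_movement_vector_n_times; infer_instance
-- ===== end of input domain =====

-- B replaces A's n-step addition loop with binary doubling over the bits of n (O(log n) additions).

-- ===== PORT A =====
-- A: while n > 0 loop adding the vector once per iteration
def apply_movement_vector_n_times (position : Int × Int) (movement_vector : Int × Int) (n : Int) : Int × Int :=
  if n > 0 then
    apply_movement_vector_n_times
      (position.1 + movement_vector.1, position.2 + movement_vector.2) movement_vector (n - 1)
  else position
termination_by n.toNat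
decreasing_by omega

-- ===== PORT B =====
-- B helper: the 'while k' loop — add the (repeatedly doubled) vector when the low bit of k is set
def pvAltLoop (x y dx dy : Int) (k : Nat) : Int × Int :=
  if k = 0 then (x, y)
  else if k % 2 = 1 then pvAltLoop (x + dx) (y + dy) (dx + dx) (dy + dy) (k / 2)
  else pvAltLoop x y (dx + dx) (dy + dy) (k / 2)

-- B: k = n if n > 0 else 0, then the doubling loop
def apply_movement_vector_n_times_alt (position : Int × Int) (movement_vector : Int × Int) (n : Int) : Int × Int :=
  pvAltLoop position.1 position.2 movement_vector.1 movement_vector.2 n.toNat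

-- ===== PRECONDITION & SPEC =====
def Spec_apply_movement_vector_n_times (position : Int × Int) (movement_vector : Int × Int) (n : Int) (out : Int × Int) : Prop := out = apply_movement_vector_n_times_alt position movement_vector n
instance (position : Int × Int) (movement_vector : Int × Int) (n : Int) (out : Int × Int) : Decidable (Spec_apply_movement_vector_n_times position movement_vector n out) := by unfold Spec_apply_movement_vector_n_times; infer_instance

-- ===== CLAIM (what is proved, stated in full; the proofs are below) =====
def Claim_equal_apply_movement_vector_n_times : Prop := ∀ (position : Int × Int) (movement_vector : Int × Int) (n : Int), Dom_apply_movement_vector_n_times position movement_vector n → Spec_apply_movement_vector_n_times position movement_vector n (apply_movement_vector_n_times position movement_vector n)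

-- ===== LEMMAS AND PROOFS =====
-- The doubling loop computes (x + k*dx, y + k*dy)
theorem pvAltLoop_eq (x y dx dy : Int) (k : Nat) :
    pvAltLoop x y dx dy k = (x + (k : Int) * dx, y + (k : Int) * dy) := by
  induction k using Nat.strong_induction_on generalizing x y dx dy with
  | _ k ih =>
    rw [pvAltLoop]
    by_cases h0 : k = 0
    · simp [h0]
    · have hlt : k / 2 < k := Nat.div_lt_self (Nat.pos_of_ne_zero h0) (by norm_num)
      have hk : k = 2 * (k / 2) + k % 2 := (Nat.div_add_mod' k 2).symm ▸ by omega
      by_cases h1 : k % 2 = 1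
      · rw [if_neg h0, if_pos h1, ih _ hlt]
        have : (k : Int) = 2 * ((k / 2 : Nat) : Int) + 1 := by
          push_cast; omega
        rw [this, Prod.mk.injEq]
        constructor <;> ring
      · rw [if_neg h0, if_neg h1, ih _ hlt]
        have : (k : Int) = 2 * ((k / 2 : Nat) : Int) := by
          push_cast; omega
        rw [this, Prod.mk.injEq]
        constructor <;> ring

-- A's loop also computes position + n.toNat * vector
theorem apply_movement_vector_n_times_eq (position movement_vector : Int × Int) (n : Int) :
    apply_movement_vector_n_times position movement_vector n =
      (position.1 + (n.toNat : Int) * movement_vector.1,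
       position.2 + (n.toNat : Int) * movement_vector.2) := by
  induction position, n using apply_movement_vector_n_times.induct movement_vector with
  | case1 position n h ih =>
    rw [apply_movement_vector_n_times, if_pos h, ih]
    have : ((n.toNat : Int)) = ((n - 1).toNat : Int) + 1 := by omega
    rw [this, Prod.mk.injEq]
    constructor <;> ring
  | case2 position n h =>
    rw [apply_movement_vector_n_times, if_neg h]
    have : ((n.toNat : Int)) = 0 := by omega
    simp [this]

-- ===== VERDICT (by name: the statement is the Claim_ definition above) =====
theorem apply_movement_vector_n_times_spec : Claim_equal_apply_movement_vector_n_times := by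
  intro position movement_vector n _
  unfold Spec_apply_movement_vector_n_times apply_movement_vector_n_times_alt
  rw [pvAltLoop_eq, apply_movement_vector_n_times_eq]
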